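-- pv_equiv track=rewrite | github.com/adrianmarino/image-captioning | lib/utils/word_utils.py | clean_punctuation
-- ===== SOURCE A (Python) =====
-- import string
--
-- def clean_punctuation(phase):
--     # prepare translation table for removing punctuation
--     table = str.maketrans('', '', string.punctuation)
--
--     # tokenize
--     words = phase.split()
--     # convert to lower case
--
--     words = [word.lower() for word in words]
--     # remove punctuation from each token
--     words = [word.translate(table) for word in words]
--     # remove hanging 's' and 'a'
--     words = [word for word in words if len(word) > 1]
--     # remove tokens with numbers in them
--     words = [word for word in words if word.isalpha()]
--     # store as string
--     return ' '.join(words)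
-- ===== SOURCE B (Python) =====
-- import string
--
--
-- def clean_punctuation(phase):
--     # Single character-level scan: a small state machine builds each cleaned
--     # token in place (lowercase, punctuation dropped, alpha-only flag tracked)
--     # and flushes it at every whitespace boundary; no split(), no intermediate
--     # token lists.
--     punct = set(string.punctuation)
--     pieces = []
--     cur = []
--     ok = True
--     for c in phase + ' ':
--         if c.isspace():
--             if len(cur) > 1 and ok:
--                 pieces.append(''.join(cur))
--             cur = []
--             ok = True
--         else:
--             cl = c.lower()
--             if cl not in punct:
--                 cur.append(cl)
--                 ok = ok and cl.isalpha()
--     return ' '.join(pieces)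
-- ===== Notes on version B (the rewrite author's own statement) =====
-- stated objective: alternative
-- what changed: Replaces the split/lower/translate/filter/filter/join pipeline over token lists with a single character-level scan of the string: a state machine builds each cleaned token in place (lowercasing, dropping punctuation, tracking an alpha-only flag) and flushes it at whitespace boundaries, so no split() and no intermediate token lists exist.
import Mathlib
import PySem

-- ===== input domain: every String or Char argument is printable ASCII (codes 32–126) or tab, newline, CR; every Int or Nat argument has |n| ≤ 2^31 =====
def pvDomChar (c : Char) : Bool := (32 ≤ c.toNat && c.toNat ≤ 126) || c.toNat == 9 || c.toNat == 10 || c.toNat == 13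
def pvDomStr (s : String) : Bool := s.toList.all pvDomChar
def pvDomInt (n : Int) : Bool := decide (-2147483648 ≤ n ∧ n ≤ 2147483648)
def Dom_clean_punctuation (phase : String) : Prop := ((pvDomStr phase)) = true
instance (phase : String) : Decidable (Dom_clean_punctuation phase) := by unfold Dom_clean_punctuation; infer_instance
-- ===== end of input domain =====

-- B replaces A's split/lower/translate/filter pipeline over token lists with one
-- character-level state machine over the string; same cost, a different decomposition.

-- string.punctuation; word.translate(table) deletes exactly these chars
def pvPunct : List Char := "!\"#$%&'()*+,-./:;<=>?@[\\]^_`{|}~".toList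

-- ===== PORT A =====
def clean_punctuation (phase : String) : String :=
  let words := PySem.Chars.split₀ phase.toList
  let words := words.map (fun word => PySem.Chars.lower word)
  -- word.translate(table): delete the punctuation characters (hand port, exact)
  let words := words.map (fun word => word.filter (fun c => !pvPunct.contains c))
  let words := words.filter (fun word => decide (word.length > 1))
  let words := words.filter (fun word => PySem.Chars.strIsalpha word)
  String.ofList (PySem.Chars.join " ".toList words)

-- ===== PORT B =====
-- state: (finished pieces, current cleaned token, "all kept chars alpha" flag)
def pvStep (st : List (List Char) × List Char × Bool) (c : Char) :
    List (List Char) × List Char × Bool :=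
  if PySem.Chars.isspace c then
    (if st.2.1.length > 1 ∧ st.2.2 = true then st.1 ++ [st.2.1] else st.1, [], true)
  else
    let cl := PySem.Chars.lowerChar c
    if pvPunct.contains cl then st
    else (st.1, st.2.1 ++ [cl], st.2.2 && PySem.Chars.isalpha cl)

def clean_punctuation_alt (phase : String) : String :=
  let st := (phase.toList ++ [' ']).foldl pvStep ([], [], true)
  String.ofList (PySem.Chars.join " ".toList st.1)

-- ===== PRECONDITION & SPEC =====
def Spec_clean_punctuation (phase : String) (out : String) : Prop := out = clean_punctuation_alt phase
instance (phase : String) (out : String) : Decidable (Spec_clean_punctuation phase out) := by unfold Spec_clean_punctuation; infer_instance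

-- ===== CLAIM (what is proved, stated in full; the proofs are below) =====
def Claim_equal_clean_punctuation : Prop := ∀ (phase : String), Dom_clean_punctuation phase → Spec_clean_punctuation phase (clean_punctuation phase)

-- ===== LEMMAS AND PROOFS =====

-- the per-word cleaning A performs: lowercase, then drop punctuation
def pvClean (w : List Char) : List Char :=
  (w.map PySem.Chars.lowerChar).filter (fun c => !pvPunct.contains c)

-- A's whole pipeline after split
def pvPipe (ws : List (List Char)) : List (List Char) :=
  ((ws.map pvClean).filter (fun w => decide (w.length > 1))).filter PySem.Chars.strIsalpha

theorem pv_go_acc (rest : List Char) : ∀ cur acc,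
    PySem.Chars.split₀.go rest cur acc = acc.reverse ++ PySem.Chars.split₀.go rest cur [] := by
  induction rest with
  | nil =>
    intro cur acc
    simp only [PySem.Chars.split₀.go]
    by_cases h : cur.isEmpty <;> simp [h]
  | cons c rest ih =>
    intro cur acc
    simp only [PySem.Chars.split₀.go]
    by_cases hs : PySem.Chars.isspace c
    · by_cases h : cur.isEmpty <;> simp only [hs, h, if_true]
      · rw [ih [] acc]
      · rw [ih [] (cur.reverse :: acc), ih [] [cur.reverse]]
        simp
    · simp only [hs, Bool.false_eq_true, if_false]
      rw [ih (c :: cur) acc]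

theorem pv_pipe_append (xs ys : List (List Char)) :
    pvPipe (xs ++ ys) = pvPipe xs ++ pvPipe ys := by
  simp [pvPipe]

theorem pv_pipe_single (w : List Char) :
    pvPipe [w] = if (pvClean w).length > 1 ∧ (pvClean w).all PySem.Chars.isalpha = true
                 then [pvClean w] else [] := by
  unfold pvPipe
  simp only [List.map_cons, List.map_nil, List.filter_cons, List.filter_nil,
    decide_eq_true_eq]
  by_cases h1 : (pvClean w).length > 1
  · rw [if_pos h1]
    have hne : (pvClean w).isEmpty = false := by
      cases h : pvClean w
      · rw [h] at h1; simp at h1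
      · simp
    have hsa : PySem.Chars.strIsalpha (pvClean w) = (pvClean w).all PySem.Chars.isalpha := by
      simp only [PySem.Chars.strIsalpha, hne, Bool.not_false, Bool.true_and]
    simp only [List.filter_cons, List.filter_nil, hsa]
    by_cases h2 : (pvClean w).all PySem.Chars.isalpha = true
    · rw [if_pos h2, if_pos ⟨h1, h2⟩]
    · rw [if_neg h2, if_neg (fun hc => h2 hc.2)]
  · rw [if_neg h1, if_neg (fun hc => h1 hc.1)]
    simp

theorem pv_key (rest : List Char) : ∀ (cur : List Char) (pieces : List (List Char)),
    ((rest ++ [' ']).foldl pvStep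
        (pieces, pvClean cur, (pvClean cur).all PySem.Chars.isalpha)).1
      = pieces ++ pvPipe (PySem.Chars.split₀.go rest cur.reverse []) := by
  induction rest with
  | nil =>
    intro cur pieces
    simp only [List.nil_append, List.foldl_cons, List.foldl_nil, pvStep]
    rw [if_pos (show PySem.Chars.isspace ' ' = true by decide)]
    simp only [PySem.Chars.split₀.go]
    by_cases h : cur.isEmpty
    · have hc : cur = [] := by cases cur <;> simp_all
      subst hc
      simp [pvClean, pvPipe]
    · have hc : cur.reverse.isEmpty = false := by cases cur <;> simp_all
      rw [hc]
      simp only [Bool.false_eq_true, if_false, List.reverse_cons, List.reverse_nil,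
        List.nil_append, List.reverse_reverse]
      rw [pv_pipe_single]
      by_cases h1 : (pvClean cur).length > 1 ∧ (pvClean cur).all PySem.Chars.isalpha = true
      · rw [if_pos h1, if_pos h1]
      · rw [if_neg h1, if_neg h1]
        simp
  | cons c rest ih =>
    intro cur pieces
    simp only [List.cons_append, List.foldl_cons]
    by_cases hs : PySem.Chars.isspace c
    · simp only [pvStep, hs, if_true]
      have h := ih []
        (if (pvClean cur).length > 1 ∧ (pvClean cur).all PySem.Chars.isalpha = true
         then pieces ++ [pvClean cur] else pieces)
      simp only [show pvClean [] = ([] : List Char) from rfl, List.all_nil,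
        List.reverse_nil] at h
      rw [h]
      simp only [PySem.Chars.split₀.go, hs, if_true]
      by_cases hcur : cur.isEmpty
      · have hc : cur = [] := by cases cur <;> simp_all
        subst hc
        have : ¬ ((pvClean ([] : List Char)).length > 1 ∧
            (pvClean ([] : List Char)).all PySem.Chars.isalpha = true) := by
          simp [pvClean]
        rw [if_neg this]
        simp
      · have hc : cur.reverse.isEmpty = false := by cases cur <;> simp_all
        rw [hc]
        simp only [Bool.false_eq_true, if_false]
        simp only [List.reverse_reverse]
        rw [pv_go_acc rest [] [cur], pv_pipe_append]
        simp only [List.reverse_cons, List.reverse_nil, List.nil_append]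
        rw [pv_pipe_single]
        by_cases h1 : (pvClean cur).length > 1 ∧ (pvClean cur).all PySem.Chars.isalpha = true
        · rw [if_pos h1, if_pos h1]
          simp
        · rw [if_neg h1, if_neg h1]
          simp
    · simp only [pvStep, hs, Bool.false_eq_true, if_false]
      by_cases hp : pvPunct.contains (PySem.Chars.lowerChar c)
      · rw [if_pos hp]
        have hmem : PySem.Chars.lowerChar c ∈ pvPunct := by simpa using hp
        have hcl : pvClean (cur ++ [c]) = pvClean cur := by
          simp [pvClean, hmem]
        have h := ih (cur ++ [c]) pieces
        simp only [hcl, List.reverse_append, List.reverse_cons, List.reverse_nil,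
          List.nil_append, List.singleton_append] at h
        rw [h]
        simp [PySem.Chars.split₀.go, hs]
      · rw [if_neg hp]
        have hmem : PySem.Chars.lowerChar c ∉ pvPunct := by simpa using hp
        have hcl : pvClean (cur ++ [c]) = pvClean cur ++ [PySem.Chars.lowerChar c] := by
          simp [pvClean, hmem]
        have h := ih (cur ++ [c]) pieces
        simp only [hcl, List.all_append, List.all_cons, List.all_nil, Bool.and_true,
          List.reverse_append, List.reverse_cons, List.reverse_nil, List.nil_append,
          List.singleton_append] at h
        rw [h]
        simp [PySem.Chars.split₀.go, hs]

-- ===== VERDICT (by name: the statement is the Claim_ definition above) =====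
theorem clean_punctuation_spec : Claim_equal_clean_punctuation := by
  intro phase _
  unfold Spec_clean_punctuation clean_punctuation clean_punctuation_alt
  dsimp only
  have hb := pv_key phase.toList [] []
  simp only [show pvClean [] = ([] : List Char) from rfl, List.all_nil,
    List.reverse_nil, List.nil_append] at hb
  rw [hb]
  congr 1
  unfold pvPipe pvClean
  rw [show PySem.Chars.split₀ phase.toList = PySem.Chars.split₀.go phase.toList [] [] from rfl]
  simp [PySem.Chars.lower, List.map_map, Function.comp_def]
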